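-- pv_equiv track=rewrite | github.com/ivlcic/slobench_ner | main.py | align_subwords_to_words
-- ===== SOURCE A (Python) =====
-- def align_subwords_to_words(labels, word_ids):
--     aligned_labels = []
--     current_word = None
--     current_label = None
--
--     for label, word_id in zip(labels, word_ids):
--         if word_id is None:  # Special tokens like [CLS] and [SEP]
--             continue
--
--         if word_id != current_word:
--             # New word
--             if current_word is not None:
--                 aligned_labels.append(current_label)
--             current_word = word_id
--             current_label = label
--
--     # Add the last word
--     if current_word is not None:
--         aligned_labels.append(current_label)
--
--     return aligned_labels
-- ===== SOURCE B (Python) =====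
-- def align_subwords_to_words(labels, word_ids):
--     # filter once, then consume one run of equal word_ids at a time:
--     # emit the run's head label, skip the rest of the run (no pending state)
--     pairs = [(w, l) for l, w in zip(labels, word_ids) if w is not None]
--     out = []
--     i, n = 0, len(pairs)
--     while i < n:
--         w, l = pairs[i]
--         out.append(l)
--         i += 1
--         while i < n and pairs[i][0] == w:
--             i += 1
--     return out
-- ===== Notes on version B (the rewrite author's own statement) =====
-- stated objective: alternative
-- what changed: Replaces A's stateful single pass (pending current_word/current_label plus a post-loop flush) by a filter step followed by a run-consuming nested loop: emit the head label of each run of equal word_ids immediately, then skip the whole run before continuing.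
import Mathlib
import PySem

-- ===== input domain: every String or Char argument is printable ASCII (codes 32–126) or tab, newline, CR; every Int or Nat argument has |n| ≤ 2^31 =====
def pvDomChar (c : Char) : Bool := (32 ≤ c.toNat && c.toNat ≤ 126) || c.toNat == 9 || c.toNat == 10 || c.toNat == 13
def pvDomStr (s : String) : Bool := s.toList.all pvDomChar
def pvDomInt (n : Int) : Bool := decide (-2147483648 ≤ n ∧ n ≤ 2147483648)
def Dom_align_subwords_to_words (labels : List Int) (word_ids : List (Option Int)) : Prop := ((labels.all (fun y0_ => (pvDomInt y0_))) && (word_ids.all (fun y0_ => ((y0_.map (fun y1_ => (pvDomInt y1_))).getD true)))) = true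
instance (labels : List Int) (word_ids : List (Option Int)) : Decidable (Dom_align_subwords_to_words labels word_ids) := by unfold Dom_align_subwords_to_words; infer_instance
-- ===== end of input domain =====

-- B replaces A's stateful single pass (pending current_label + post-loop flush) by a filter
-- step and structural recursion on runs of equal word_ids; same cost (alternative).

-- ===== PORT A =====
-- loop state: (aligned_labels, current_word, current_label); current_label is Option Int
-- (initially None) and is appended via .getD 0 — it is provably some whenever appended,
-- because current_word and current_label are set together.
def alignStateA := List Int × Option Int × Option Int

-- body of A's for-loop, one (label, word_id) element
def alignStepA (st : alignStateA) (p : Int × Option Int) : alignStateA :=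
  match p.2 with
  | none => st            -- word_id is None: continue
  | some wid =>
    if some wid ≠ st.2.1 then
      ((match st.2.1 with
        | some _ => st.1 ++ [st.2.2.getD 0]   -- current_word is not None: append current_label
        | none => st.1), some wid, some p.1)
    else st

def align_subwords_to_words (labels : List Int) (word_ids : List (Option Int)) : List Int :=
  let st := (labels.zip word_ids).foldl alignStepA ([], none, none)
  -- add the last word
  match st.2.1 with
  | some _ => st.1 ++ [st.2.2.getD 0]
  | none => st.1

-- ===== PORT B =====
-- first_of_runs: the Python index-skipping inner while loop is List.dropWhile here
def alignRunsFirst : List (Int × Int) → List Int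
  | [] => []
  | (w, l) :: rest => l :: alignRunsFirst (rest.dropWhile (fun q => q.1 == w))
termination_by ps => ps.length
decreasing_by
  exact Nat.lt_succ_of_le (List.length_dropWhile_le _ _)

def align_subwords_to_words_alt (labels : List Int) (word_ids : List (Option Int)) : List Int :=
  let pairs := (labels.zip word_ids).filterMap (fun p => p.2.map (fun w => (w, p.1)))
  alignRunsFirst pairs

-- ===== PRECONDITION & SPEC =====
def Spec_align_subwords_to_words (labels : List Int) (word_ids : List (Option Int)) (out : List Int) : Prop := out = align_subwords_to_words_alt labels word_ids
instance (labels : List Int) (word_ids : List (Option Int)) (out : List Int) : Decidable (Spec_align_subwords_to_words labels word_ids out) := by unfold Spec_align_subwords_to_words; infer_instance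

-- ===== CLAIM (what is proved, stated in full; the proofs are below) =====
def Claim_equal_align_subwords_to_words : Prop := ∀ (labels : List Int) (word_ids : List (Option Int)), Dom_align_subwords_to_words labels word_ids → Spec_align_subwords_to_words labels word_ids (align_subwords_to_words labels word_ids)

-- ===== LEMMAS AND PROOFS =====

-- the (word_id, label) pairs both sides effectively iterate over
def alignPairs (labels : List Int) (word_ids : List (Option Int)) : List (Int × Int) :=
  (labels.zip word_ids).filterMap (fun p => p.2.map (fun w => (w, p.1)))

-- A's step restricted to a non-None word_id
def alignStepA' (st : alignStateA) (q : Int × Int) : alignStateA :=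
  if some q.1 ≠ st.2.1 then
    ((match st.2.1 with
      | some _ => st.1 ++ [st.2.2.getD 0]
      | none => st.1), some q.1, some q.2)
  else st

-- what A's pending state contributes to the final output
def alignG (cw cl : Option Int) : List (Int × Int) → List Int
  | [] => match cw with
          | some _ => [cl.getD 0]
          | none => []
  | (w, l) :: rest =>
    if some w ≠ cw then
      (match cw with
       | some _ => cl.getD 0 :: alignG (some w) (some l) rest
       | none => alignG (some w) (some l) rest)
    else alignG cw cl rest

theorem foldl_skip_none (zl : List (Int × Option Int)) (st : alignStateA) :
    zl.foldl alignStepA st =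
      (zl.filterMap (fun p => p.2.map (fun w => (w, p.1)))).foldl alignStepA' st := by
  induction zl generalizing st with
  | nil => rfl
  | cons p rest ih =>
    cases p with
    | mk l wo =>
      cases wo with
      | none => simpa [alignStepA] using ih st
      | some w =>
        simp only [List.foldl_cons, List.filterMap_cons, Option.map_some]
        rw [ih]
        rfl

def alignFinish (st : alignStateA) : List Int :=
  match st.2.1 with
  | some _ => st.1 ++ [st.2.2.getD 0]
  | none => st.1

theorem finish_foldl (pairs : List (Int × Int)) :
    ∀ (acc : List Int) (cw cl : Option Int),
      alignFinish (pairs.foldl alignStepA' (acc, cw, cl)) = acc ++ alignG cw cl pairs := by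
  induction pairs with
  | nil =>
    intro acc cw cl
    cases cw <;> simp [alignFinish, alignG]
  | cons q rest ih =>
    intro acc cw cl
    cases q with
    | mk w l =>
      simp only [List.foldl_cons, alignStepA', alignG]
      split_ifs with h
      · cases cw <;> simp [ih]
      · simp [ih]

theorem alignG_some (pairs : List (Int × Int)) :
    ∀ (w l : Int), alignG (some w) (some l) pairs =
      l :: alignRunsFirst (pairs.dropWhile (fun q => q.1 == w)) := by
  induction pairs with
  | nil => intro w l; simp [alignG, alignRunsFirst]
  | cons q rest ih =>
    intro w l
    obtain ⟨w', l'⟩ := q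
    rw [alignG]
    by_cases h : w' = w
    · have hb : (w' == w) = true := by simpa using h
      rw [if_neg (by simp [h])]
      simp only [List.dropWhile_cons, hb, if_true]
      exact ih w l
    · have hb : (w' == w) = false := by simpa using h
      rw [if_pos (by simpa using h)]
      simp only [List.dropWhile_cons, hb, Bool.false_eq_true, if_false]
      simp only [alignRunsFirst]
      simpa using ih w' l'

theorem alignG_none (pairs : List (Int × Int)) :
    alignG none none pairs = alignRunsFirst pairs := by
  cases pairs with
  | nil => simp [alignG, alignRunsFirst]
  | cons q rest =>
    cases q with
    | mk w l =>
      rw [alignG]; simp only [alignRunsFirst]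
      simp [alignG_some]

-- ===== VERDICT (by name: the statement is the Claim_ definition above) =====
theorem align_subwords_to_words_spec : Claim_equal_align_subwords_to_words := by
  intro labels word_ids _
  show align_subwords_to_words labels word_ids = align_subwords_to_words_alt labels word_ids
  have h1 : align_subwords_to_words labels word_ids =
      alignFinish ((alignPairs labels word_ids).foldl alignStepA' ([], none, none)) := by
    rw [align_subwords_to_words, alignPairs, ← foldl_skip_none]
    rfl
  rw [h1, finish_foldl, alignG_none]
  rfl
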